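-- pv_equiv track=rewrite | github.com/hyohyeon08/kim_baekjoon | 프로그래머스/0/120836. 순서쌍의 개수/순서쌍의 개수.py | solution
-- ===== SOURCE A (Python) =====
-- def solution(n):
--     answer = 0
--     new_p = []
--     for i in range(1, n+1):
--         if(n % i ==0):
--             new_p.append(i)
--     for j in new_p:
--         for k in new_p:
--             if(j * k == n):
--                 answer += 1
--     return answer
-- ===== SOURCE B (Python) =====
-- def solution(n):
--     cnt = 0
--     i = 1
--     while i * i <= n:
--         if n % i == 0:
--             cnt += 1 if i * i == n else 2
--         i += 1
--     return cnt
-- ===== Notes on version B (the rewrite author's own statement) =====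
-- stated objective: faster
-- what changed: A enumerates all divisors in O(n) and then counts ordered pairs with a quadratic nested scan; B counts divisors directly by trial division up to sqrt(n), adding two per complementary divisor pair and one for an exact square root.
import Mathlib
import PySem

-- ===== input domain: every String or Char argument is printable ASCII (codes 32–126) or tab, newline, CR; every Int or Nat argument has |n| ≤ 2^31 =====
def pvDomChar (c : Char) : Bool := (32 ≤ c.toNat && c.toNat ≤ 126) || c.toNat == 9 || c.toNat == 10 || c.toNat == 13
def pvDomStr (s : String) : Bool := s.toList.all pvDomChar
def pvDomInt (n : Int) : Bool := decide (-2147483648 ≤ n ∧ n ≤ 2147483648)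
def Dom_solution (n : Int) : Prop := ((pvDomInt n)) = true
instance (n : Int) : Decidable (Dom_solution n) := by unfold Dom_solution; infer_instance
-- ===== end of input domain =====

-- B replaces A's O(n) divisor enumeration followed by a quadratic nested pair scan with a
-- single trial-division loop up to sqrt(n) (objective: faster, asymptotic).

-- ===== PORT A =====
def solution (n : Int) : Int :=
  let new_p := (PySem.List.pyRange 1 (n + 1)).foldl
      (fun acc i => if PySem.Int.mod n i == 0 then acc ++ [i] else acc) []
  new_p.foldl (fun answer j =>
    new_p.foldl (fun answer k => if j * k == n then answer + 1 else answer) answer) 0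

-- ===== PORT B =====
-- Source B's while-loop as fuel recursion; fuel n.toNat bounds the iteration count
-- (proved in altLoop_eq below).
def altLoop (n : Int) : Nat → Int → Int → Int
  | 0, _, cnt => cnt
  | fuel + 1, i, cnt =>
    if i * i ≤ n then
      altLoop n fuel (i + 1)
        (if PySem.Int.mod n i == 0 then (if i * i == n then cnt + 1 else cnt + 2) else cnt)
    else cnt

def solution_alt (n : Int) : Int := altLoop n n.toNat 1 0

-- ===== PRECONDITION & SPEC =====
def Spec_solution (n : Int) (out : Int) : Prop := out = solution_alt n
instance (n : Int) (out : Int) : Decidable (Spec_solution n out) := by unfold Spec_solution; infer_instance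

-- ===== CLAIM (what is proved, stated in full; the proofs are below) =====
def Claim_equal_solution : Prop := ∀ (n : Int), Dom_solution n → Spec_solution n (solution n)

-- ===== LEMMAS AND PROOFS =====

-- the list A's first loop builds
def newp (n : Int) : List Int :=
  (PySem.List.pyRange 1 (n + 1)).filter (fun i => PySem.Int.mod n i == 0)

-- the divisors of n in [1, n], as a finite set (proof-only helper)
noncomputable def Dv (n : Int) : Finset Int :=
  (Finset.Icc 1 n).filter (fun d => PySem.Int.mod n d = 0)

-- B's per-iteration contribution
def wI (n j : Int) : Int :=
  if PySem.Int.mod n j = 0 then (if j * j = n then 1 else 2) else 0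

-- indices still to be visited by B's loop when the counter is at i
noncomputable def Tset (n i : Int) : Finset Int :=
  (Finset.Icc i n).filter (fun j => j * j ≤ n)

lemma newp_spec (n : Int) :
    (PySem.List.pyRange 1 (n + 1)).foldl
      (fun acc i => if PySem.Int.mod n i == 0 then acc ++ [i] else acc) [] = newp n := by
  simpa [newp] using
    PySem.List.foldl_append_if (fun i => PySem.Int.mod n i == 0) (fun i => i)
      (PySem.List.pyRange 1 (n + 1)) []

lemma mem_newp {n x : Int} : x ∈ newp n ↔ (1 ≤ x ∧ x < n + 1) ∧ x ∣ n := by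
  simp [newp, List.mem_filter, PySem.List.mem_pyRange_one, PySem.Int.mod_eq_zero_iff_dvd]

lemma nodup_newp (n : Int) : (newp n).Nodup :=
  (PySem.List.nodup_pyRange_one 1 (n + 1)).filter _

lemma countP_newp_one (n j : Int) (hn : 1 ≤ n) (hj : j ∈ newp n) :
    (newp n).countP (fun k => j * k == n) = 1 := by
  obtain ⟨⟨hj1, hjn⟩, hjd⟩ := mem_newp.mp hj
  obtain ⟨e, he⟩ := hjd
  have hj0 : j ≠ 0 := by omega
  have he1 : 1 ≤ e := by nlinarith
  have hemem : e ∈ newp n :=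
    mem_newp.mpr ⟨⟨he1, by nlinarith⟩, ⟨j, by rw [he]; ring⟩⟩
  have hpq : ∀ k ∈ newp n, ((j * k == n) = true ↔ (k == e) = true) := by
    intro k _
    simp only [beq_iff_eq]
    constructor
    · intro h
      exact mul_left_cancel₀ hj0 (h.trans he)
    · rintro rfl
      exact he.symm
  rw [List.countP_congr hpq]
  have : (newp n).countP (fun k => k == e) = (newp n).count e := by
    simp [List.count]
  rw [this]
  exact List.count_eq_one_of_mem (nodup_newp n) hemem

lemma length_newp (n : Int) : (newp n).length = (Dv n).card := by
  rw [← List.toFinset_card_of_nodup (nodup_newp n)]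
  congr 1
  ext x
  simp only [List.mem_toFinset, mem_newp, Dv, Finset.mem_filter, Finset.mem_Icc,
    PySem.Int.mod_eq_zero_iff_dvd]
  omega

lemma solution_eq (n : Int) (hn : 1 ≤ n) : solution n = ((Dv n).card : Int) := by
  simp only [solution, newp_spec, PySem.List.foldl_count_if, PySem.List.foldl_add]
  have h1 : ((newp n).map (fun j => (((newp n).countP fun k => j * k == n) : Int))).sum
      = ((newp n).map (fun _ => (1 : Int))).sum := by
    congr 1
    apply List.map_congr_left
    intro j hj
    rw [countP_newp_one n j hn hj]
    norm_num
  rw [h1, List.map_const', List.sum_replicate, ← length_newp n]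
  simp

lemma Tset_empty (n i : Int) (h1 : 1 ≤ i) (h2 : n < i * i) : Tset n i = ∅ := by
  ext j
  simp only [Tset, Finset.mem_filter, Finset.mem_Icc, Finset.notMem_empty, iff_false, not_and]
  intro hij hjn
  nlinarith

lemma Tset_insert (n i : Int) (h1 : 1 ≤ i) (h2 : i * i ≤ n) :
    Tset n i = insert i (Tset n (i + 1)) := by
  ext j
  simp only [Tset, Finset.mem_insert, Finset.mem_filter, Finset.mem_Icc]
  constructor
  · rintro ⟨⟨hij, hjn⟩, hjj⟩
    rcases eq_or_lt_of_le hij with h | h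
    · exact Or.inl h.symm
    · exact Or.inr ⟨⟨by omega, hjn⟩, hjj⟩
  · rintro (rfl | ⟨⟨hij, hjn⟩, hjj⟩)
    · exact ⟨⟨le_rfl, by nlinarith⟩, h2⟩
    · exact ⟨⟨by omega, hjn⟩, hjj⟩

lemma not_mem_Tset_succ (n i : Int) : i ∉ Tset n (i + 1) := by
  simp only [Tset, Finset.mem_filter, Finset.mem_Icc]
  omega

lemma altLoop_eq (n : Int) (fuel : Nat) :
    ∀ (i cnt : Int), 1 ≤ i → n < (i + (fuel : Int)) * (i + (fuel : Int)) →
      altLoop n fuel i cnt = cnt + ∑ j ∈ Tset n i, wI n j := by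
  induction fuel with
  | zero =>
    intro i cnt h1 h2
    rw [Tset_empty n i h1 (by push_cast at h2; linarith)]
    simp [altLoop]
  | succ fuel ih =>
    intro i cnt h1 h2
    have h2' : n < (i + 1 + (fuel : Int)) * (i + 1 + (fuel : Int)) := by
      push_cast at h2; nlinarith
    simp only [altLoop]
    by_cases hle : i * i ≤ n
    · rw [if_pos hle, ih (i + 1) _ (by omega) h2',
        Tset_insert n i h1 hle, Finset.sum_insert (not_mem_Tset_succ n i)]
      by_cases hm : PySem.Int.mod n i = 0
      · by_cases hq : i * i = n
        · simp only [wI, hm, hq]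
          norm_num
          try ring
        · simp only [wI, hm, hq]
          norm_num [hq]
          try ring
      · simp only [wI, hm]
        norm_num [hm]
        try ring
    · rw [if_neg hle, Tset_empty n i h1 (lt_of_not_ge hle)]
      simp

lemma solution_alt_eq (n : Int) (hn : 1 ≤ n) :
    solution_alt n = ∑ j ∈ Tset n 1, wI n j := by
  have ht : ((n.toNat : Int)) = n := Int.toNat_of_nonneg (by omega)
  have := altLoop_eq n n.toNat 1 0 le_rfl (by rw [ht]; nlinarith)
  simpa [solution_alt] using this

lemma pvDivFlip (n d : Int) (hn : 1 ≤ n) (hd : d ∈ Dv n) :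
    (n / d) ∈ Dv n ∧ n / (n / d) = d ∧ (d * d < n → n < (n / d) * (n / d)) ∧
      (n < d * d → (n / d) * (n / d) < n) := by
  obtain ⟨hIcc, hm⟩ := Finset.mem_filter.mp hd
  obtain ⟨h1, h2⟩ := Finset.mem_Icc.mp hIcc
  obtain ⟨e, he⟩ := (PySem.Int.mod_eq_zero_iff_dvd n d).mp hm
  have hd0 : d ≠ 0 := by omega
  have hdiv : n / d = e := by rw [he, Int.mul_ediv_cancel_left _ hd0]
  have he1 : 1 ≤ e := by nlinarith
  have hen : e ≤ n := by nlinarith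
  have he0 : e ≠ 0 := by omega
  have hdiv2 : n / e = d := by rw [he, mul_comm, Int.mul_ediv_cancel_left _ he0]
  refine ⟨?_, ?_, ?_, ?_⟩
  · rw [hdiv]
    exact Finset.mem_filter.mpr ⟨Finset.mem_Icc.mpr ⟨he1, hen⟩,
      (PySem.Int.mod_eq_zero_iff_dvd n e).mpr ⟨d, by rw [he]; ring⟩⟩
  · rw [hdiv, hdiv2]
  · intro h
    have hde : d < e := by nlinarith
    have := mul_lt_mul_of_pos_right hde (by omega : (0 : Int) < e)
    rw [hdiv]; nlinarith
  · intro h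
    have hed : e < d := by nlinarith
    have := mul_lt_mul_of_pos_right hed (by omega : (0 : Int) < e)
    rw [hdiv]; nlinarith

lemma card_lt_eq_card_gt (n : Int) (hn : 1 ≤ n) :
    ((Dv n).filter (fun j => j * j < n)).card = ((Dv n).filter (fun j => n < j * j)).card := by
  refine Finset.card_nbij' (i := fun d => n / d) (j := fun d => n / d) ?_ ?_ ?_ ?_
  · intro d hd
    obtain ⟨hdD, hdlt⟩ := Finset.mem_filter.mp hd
    obtain ⟨hmem, _, h3, _⟩ := pvDivFlip n d hn hdD
    exact Finset.mem_filter.mpr ⟨hmem, h3 hdlt⟩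
  · intro d hd
    obtain ⟨hdD, hdgt⟩ := Finset.mem_filter.mp hd
    obtain ⟨hmem, _, _, h4⟩ := pvDivFlip n d hn hdD
    exact Finset.mem_filter.mpr ⟨hmem, h4 hdgt⟩
  · intro d hd
    exact (pvDivFlip n d hn (Finset.mem_filter.mp hd).1).2.1
  · intro d hd
    exact (pvDivFlip n d hn (Finset.mem_filter.mp hd).1).2.1

lemma sum_Tset_eq_card (n : Int) (hn : 1 ≤ n) :
    ∑ j ∈ Tset n 1, wI n j = ((Dv n).card : Int) := by
  have hsplit : ∑ j ∈ Tset n 1, wI n j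
      = ∑ j ∈ (Tset n 1).filter (fun j => PySem.Int.mod n j = 0),
          (if j * j = n then (1 : Int) else 2) := by
    rw [Finset.sum_filter]
    exact Finset.sum_congr rfl (fun j _ => rfl)
  have hset : (Tset n 1).filter (fun j => PySem.Int.mod n j = 0)
      = (Dv n).filter (fun j => j * j ≤ n) := by
    ext j
    simp only [Tset, Dv, Finset.mem_filter, Finset.mem_Icc]
    tauto
  have hlt : ((Dv n).filter (fun j => j * j ≤ n)).filter (fun j => j * j < n)
      = (Dv n).filter (fun j => j * j < n) := by
    ext j
    simp only [Finset.mem_filter]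
    constructor
    · tauto
    · rintro ⟨h1, h2⟩
      exact ⟨⟨h1, le_of_lt h2⟩, h2⟩
  have hsum2 : ∑ j ∈ (Dv n).filter (fun j => j * j ≤ n), (if j * j = n then (1 : Int) else 2)
      = (((Dv n).filter (fun j => j * j ≤ n)).card : Int)
        + (((Dv n).filter (fun j => j * j < n)).card : Int) := by
    have hc : ∀ j ∈ (Dv n).filter (fun j => j * j ≤ n),
        (if j * j = n then (1 : Int) else 2) = 1 + (if j * j < n then (1 : Int) else 0) := by
      intro j hj
      have hle : j * j ≤ n := (Finset.mem_filter.mp hj).2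
      rcases eq_or_lt_of_le hle with h | h
      · rw [if_pos h, if_neg (by rw [h]; exact lt_irrefl n)]
        norm_num
      · rw [if_neg (ne_of_lt h), if_pos h]
        norm_num
    rw [Finset.sum_congr rfl hc, Finset.sum_add_distrib, Finset.sum_const, Finset.sum_boole,
      ← hlt]
    push_cast
    ring
  have hpart : ((Dv n).filter (fun j => j * j ≤ n)).card
      + ((Dv n).filter (fun j => n < j * j)).card = (Dv n).card := by
    have h := Finset.card_filter_add_card_filter_not
      (s := Dv n) (p := fun j => j * j ≤ n)
    have hneg : (Dv n).filter (fun j => ¬ j * j ≤ n) = (Dv n).filter (fun j => n < j * j) := by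
      ext j
      simp only [Finset.mem_filter, not_le]
    rw [← hneg]
    exact h
  rw [hsplit, hset, hsum2, card_lt_eq_card_gt n hn, ← hpart]
  norm_cast

-- ===== VERDICT (by name: the statement is the Claim_ definition above) =====
theorem solution_spec : Claim_equal_solution := by
  intro n _
  unfold Spec_solution
  by_cases hn : 1 ≤ n
  · rw [solution_eq n hn, solution_alt_eq n hn, sum_Tset_eq_card n hn]
  · have h0 : n + 1 ≤ 1 := by omega
    have ha : solution n = 0 := by
      simp [solution, PySem.List.pyRange_one_eq_nil h0]
    have hb : solution_alt n = 0 := by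
      simp [solution_alt, Int.toNat_of_nonpos (by omega : n ≤ 0), altLoop]
    rw [ha, hb]
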